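-- pv_equiv track=rewrite | github.com/hxr1117/Graduate-Project | Source Code/GPv3-command/package/extract_events.py | terms_position_freq
-- ===== SOURCE A (Python) =====
-- def terms_position_freq(data):
--     max_len = max(len(i) for i in data)
--     terms = dict()
--     for idx in range(len(data)):
--         for idx_w in range(len(data[idx])):
--             if data[idx][idx_w] not in terms:
--                 terms[data[idx][idx_w]] = [0] * max_len
--             terms[data[idx][idx_w]][idx_w] += 1
--     return terms
-- ===== SOURCE B (Python) =====
-- def terms_position_freq(data):
--     max_len = max(len(r) for r in data)
--     cnt = {}
--     for r in data:
--         for p, t in enumerate(r):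
--             key = (t, p)
--             cnt[key] = cnt.get(key, 0) + 1
--     terms = {}
--     for (t, p), c in cnt.items():
--         if t not in terms:
--             terms[t] = [0] * max_len
--         terms[t][p] = c
--     return terms
-- ===== Notes on version B (the rewrite author's own statement) =====
-- stated objective: alternative
-- what changed: A fills each term's vector by one nested in-place accumulation (terms[t][pos] += 1 while scanning); B first builds a flat counter dict keyed by (term, position) over the enumerated rows, then reshapes it in a second pass over the counter's items, allocating [0]*max_len per new term and assigning each final count directly.
import Mathlib
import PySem

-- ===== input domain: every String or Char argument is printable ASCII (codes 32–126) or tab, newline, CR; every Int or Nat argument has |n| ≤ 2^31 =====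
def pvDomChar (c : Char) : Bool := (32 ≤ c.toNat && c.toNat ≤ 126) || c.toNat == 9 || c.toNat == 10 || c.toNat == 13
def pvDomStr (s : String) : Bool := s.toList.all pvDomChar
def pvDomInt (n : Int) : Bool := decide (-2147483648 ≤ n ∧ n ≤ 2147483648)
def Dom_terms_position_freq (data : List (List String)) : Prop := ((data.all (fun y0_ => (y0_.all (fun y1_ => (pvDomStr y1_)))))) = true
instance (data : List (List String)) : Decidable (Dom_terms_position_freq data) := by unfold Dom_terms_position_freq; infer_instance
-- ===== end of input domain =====

-- B replaces A's single nested in-place accumulation by two passes: a flat (term, position) counter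
-- over the enumerated rows, then a reshaping pass that builds each term's row vector from the counter
-- (objective: alternative decomposition, same asymptotic cost). Equivalence of the RETURN value is proved
-- on Pre_ (nonempty data; on [] Python's max() raises ValueError).

-- ===== PORT A =====
def terms_position_freq (data : List (List String)) : List (String × List Int) :=
  -- max_len = max(len(i) for i in data); Python raises ValueError on empty data (excluded by Pre_)
  match PySem.List.max? (data.map PySem.List.len) id with
  | none => []
  | some max_len =>
    let terms : PySem.Dict String (List Int) :=
      (PySem.List.pyRange 0 (PySem.List.len data)).foldl (fun terms idx =>
        let row := PySem.List.pyGetD data idx []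
        (PySem.List.pyRange 0 (PySem.List.len row)).foldl (fun terms idx_w =>
          let t := PySem.List.pyGetD row idx_w ""
          let terms' := if terms.contains t then terms
                        else terms.insert t (List.replicate max_len.toNat (0 : Int))
          -- terms[t][idx_w] += 1  (idx_w is always in range: idx_w < len(row) ≤ max_len)
          terms'.modify t [] (fun l => PySem.List.pySetD l idx_w (PySem.List.pyGetD l idx_w 0 + 1)))
          terms)
        PySem.Dict.empty
    terms.items

-- ===== PORT B =====
def terms_position_freq_alt (data : List (List String)) : List (String × List Int) :=
  match PySem.List.max? (data.map PySem.List.len) id with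
  | none => []
  | some max_len =>
    let cnt : PySem.Dict (String × Int) Int :=
      data.foldl (fun cnt r =>
        (PySem.List.enumerate r).foldl (fun cnt pt =>
          let key := (pt.2, pt.1)
          cnt.insert key (cnt.getD key 0 + 1)) cnt) PySem.Dict.empty
    let terms : PySem.Dict String (List Int) :=
      cnt.items.foldl (fun terms kc =>
        let terms' := if terms.contains kc.1.1 then terms
                      else terms.insert kc.1.1 (List.replicate max_len.toNat (0 : Int))
        terms'.modify kc.1.1 [] (fun l => PySem.List.pySetD l kc.1.2 kc.2)) PySem.Dict.empty
    terms.items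

-- ===== PRECONDITION & SPEC =====
-- Pre_ excludes only empty data, on which Python's max() raises ValueError.
def Pre_terms_position_freq (data : List (List String)) : Prop := data ≠ []
instance (data : List (List String)) : Decidable (Pre_terms_position_freq data) := by unfold Pre_terms_position_freq; infer_instance
def pvWitness_terms_position_freq : List (List String) := [["a", "b"], ["a"]]
def Spec_terms_position_freq (data : List (List String)) (out : List (String × List Int)) : Prop := out = terms_position_freq_alt data
instance (data : List (List String)) (out : List (String × List Int)) : Decidable (Spec_terms_position_freq data out) := by unfold Spec_terms_position_freq; infer_instance

-- ===== CLAIM (what is proved, stated in full; the proofs are below) =====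
def Claim_equal_terms_position_freq : Prop := ∀ (data : List (List String)), Dom_terms_position_freq data → Pre_terms_position_freq data → Spec_terms_position_freq data (terms_position_freq data)

-- ===== LEMMAS AND PROOFS =====

-- the row-major (term, position) occurrence stream both ports traverse
def pvFlat (data : List (List String)) : List (String × Int) :=
  data.flatMap (fun r => (PySem.List.enumerate r).map (fun pt => (pt.2, pt.1)))

-- A's loop body as a step over one (term, position) occurrence
def pvStep (m : Int) (d : PySem.Dict String (List Int)) (tp : String × Int) : PySem.Dict String (List Int) :=
  let terms' := if d.contains tp.1 then d
                else d.insert tp.1 (List.replicate m.toNat (0 : Int))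
  terms'.modify tp.1 [] (fun l => PySem.List.pySetD l tp.2 (PySem.List.pyGetD l tp.2 0 + 1))

-- the per-term count vector of a stream
def pvVec (m : Int) (s : List (String × Int)) (t : String) : List Int :=
  (PySem.List.pyRange 0 m).map (fun p => ((s.count (t, p) : Nat) : Int))

theorem pvVec_ne (m : Int) (s : List (String × Int)) (x : String × Int) (t : String)
    (h : t ≠ x.1) : pvVec m (s ++ [x]) t = pvVec m s t := by
  unfold pvVec
  apply List.map_congr_left
  intro p _
  have hx : x ≠ (t, p) := by
    intro he; exact h (by rw [he])
  simp [List.count_append, hx]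

theorem pvVec_zero (m : Int) (hm : 0 ≤ m) (s : List (String × Int)) (t : String)
    (h : t ∉ s.map Prod.fst) : pvVec m s t = List.replicate m.toNat 0 := by
  obtain ⟨n, rfl⟩ : ∃ n : Nat, m = (n : Int) := ⟨m.toNat, (Int.toNat_of_nonneg hm).symm⟩
  unfold pvVec
  rw [PySem.List.pyRange_zero_natCast, List.map_map, List.eq_replicate_iff]
  refine ⟨by simp, ?_⟩
  intro v hv
  rw [List.mem_map] at hv
  obtain ⟨p, _, rfl⟩ := hv
  have hnm : ∀ q : Int, (t, q) ∉ s := by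
    intro q hmem; exact h (List.mem_map.mpr ⟨(t, q), hmem, rfl⟩)
  simp [List.count_eq_zero.mpr (hnm _)]

theorem pvVec_set (m : Int) (s : List (String × Int)) (t : String) (p : Int)
    (hp0 : 0 ≤ p) (hpm : p < m) :
    PySem.List.pySetD (pvVec m s t) p (PySem.List.pyGetD (pvVec m s t) p 0 + 1)
      = pvVec m (s ++ [(t, p)]) t := by
  have hm : 0 ≤ m := le_of_lt (lt_of_le_of_lt hp0 hpm)
  obtain ⟨n, rfl⟩ : ∃ n : Nat, m = (n : Int) := ⟨m.toNat, (Int.toNat_of_nonneg hm).symm⟩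
  obtain ⟨k, rfl⟩ : ∃ k : Nat, p = (k : Int) := ⟨p.toNat, (Int.toNat_of_nonneg hp0).symm⟩
  have hkn : k < n := by exact_mod_cast hpm
  have hvec : ∀ (s' : List (String × Int)),
      pvVec n s' t = (List.range n).map (fun j : Nat => ((s'.count (t, ((j : Nat) : Int)) : Nat) : Int)) := by
    intro s'
    rw [pvVec, PySem.List.pyRange_zero_natCast]
    simp
  have hlen : (pvVec (n : Int) s t).length = n := by rw [hvec, List.length_map, List.length_range]
  have hget : PySem.List.pyGetD (pvVec (n : Int) s t) (k : Int) 0 = ((s.count (t, (k : Int)) : Nat) : Int) := by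
    rw [PySem.List.pyGetD_eq_getElem _ _ (by positivity) (by rw [hlen]; exact_mod_cast hkn)]
    simp only [hvec, Int.toNat_natCast]
    rw [List.getElem_map, List.getElem_range]
  have hset : ∀ w : Int, PySem.List.pySetD (pvVec (n : Int) s t) (k : Int) w
      = (pvVec (n : Int) s t).set k w := by
    intro w
    simp only [PySem.List.pySetD, PySem.List.pySet?, PySem.List.pyIdx?, hlen]
    split
    · simp
    · omega
  rw [hget, hset]
  apply List.ext_getElem
  · rw [List.length_set, hlen, hvec, List.length_map, List.length_range]
  · intro i h1 h2
    rw [List.getElem_set]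
    have hi : i < n := by rw [List.length_set, hlen] at h1; exact h1
    simp only [hvec, List.getElem_map, List.getElem_range]
    by_cases hik : k = i
    · subst hik
      rw [List.count_append]
      simp
    · rw [if_neg hik, List.count_append]
      have : (t, (k : Int)) ≠ (t, (i : Int)) := by
        intro he
        apply hik
        have h2 : ((k : Nat) : Int) = ((i : Nat) : Int) := congrArg Prod.snd he
        exact_mod_cast h2
      simp [this]

-- A's nested loops are the fold of pvStep over the flat occurrence stream
theorem pvNested (data : List (List String)) (m : Int) :
    (PySem.List.pyRange 0 (PySem.List.len data)).foldl (fun terms idx =>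
        let row := PySem.List.pyGetD data idx []
        (PySem.List.pyRange 0 (PySem.List.len row)).foldl (fun terms idx_w =>
          let t := PySem.List.pyGetD row idx_w ""
          let terms' := if terms.contains t then terms
                        else terms.insert t (List.replicate m.toNat (0 : Int))
          terms'.modify t [] (fun l => PySem.List.pySetD l idx_w (PySem.List.pyGetD l idx_w 0 + 1)))
          terms)
        PySem.Dict.empty
      = (pvFlat data).foldl (pvStep m) PySem.Dict.empty := by
  rw [pvFlat, List.foldl_flatMap]
  rw [PySem.List.foldl_pyRange_pyGetD data ([] : List String)
      (fun terms row => (PySem.List.pyRange 0 (PySem.List.len row)).foldl (fun terms idx_w =>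
          let t := PySem.List.pyGetD row idx_w ""
          let terms' := if terms.contains t then terms
                        else terms.insert t (List.replicate m.toNat (0 : Int))
          terms'.modify t [] (fun l => PySem.List.pySetD l idx_w (PySem.List.pyGetD l idx_w 0 + 1)))
          terms) PySem.Dict.empty (le_refl 0)]
  rw [Int.toNat_zero, List.drop_zero]
  congr 1
  funext terms row
  rw [PySem.List.enumerate_eq_map_pyRange row "", List.foldl_map, List.foldl_map]
  rfl

def pvItems (s : List (String × Int)) : List ((String × Int) × Int) :=
  (PySem.Set.ofList s).map (fun k => (k, (s.count k : Int)))

-- B's reshaping step over one counter item ((term, position), count)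

def pvStep2 (m : Int) (d : PySem.Dict String (List Int)) (kc : (String × Int) × Int) :
    PySem.Dict String (List Int) :=
  let terms' := if d.contains kc.1.1 then d
                else d.insert kc.1.1 (List.replicate m.toNat (0 : Int))
  terms'.modify kc.1.1 [] (fun l => PySem.List.pySetD l kc.1.2 kc.2)

-- the value an association list of counter items assigns to a key (0 if absent)

def pvVal (L : List ((String × Int) × Int)) (a : String × Int) : Int :=
  match L.find? (fun kc => kc.1 == a) with
  | some kc => kc.2
  | none => 0

def pvVecL (L : List ((String × Int) × Int)) (m : Int) (t : String) : List Int :=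
  (PySem.List.pyRange 0 m).map (fun p => pvVal L (t, p))

theorem pvVal_append_of_ne (L : List ((String × Int) × Int)) (x : (String × Int) × Int)
    (a : String × Int) (h : a ≠ x.1) : pvVal (L ++ [x]) a = pvVal L a := by
  unfold pvVal
  rw [List.find?_append]
  have hb : (x.1 == a) = false := beq_eq_false_iff_ne.mpr (Ne.symm h)
  have : List.find? (fun kc => kc.1 == a) [x] = none := by
    simp [List.find?, hb]
  rw [this, Option.or_none]

theorem pvVal_append_self (L : List ((String × Int) × Int)) (x : (String × Int) × Int)
    (h : x.1 ∉ L.map (·.1)) : pvVal (L ++ [x]) x.1 = x.2 := by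
  unfold pvVal
  rw [List.find?_append]
  have h1 : List.find? (fun kc => kc.1 == x.1) L = none := by
    rw [List.find?_eq_none]
    intro kc hkc
    simp only [beq_iff_eq]
    intro he
    exact h (List.mem_map.mpr ⟨kc, hkc, he⟩)
  rw [h1]
  simp [List.find?]

theorem pvVecL_ne (L : List ((String × Int) × Int)) (x : (String × Int) × Int)
    (m : Int) (t : String) (h : t ≠ x.1.1) : pvVecL (L ++ [x]) m t = pvVecL L m t := by
  unfold pvVecL
  apply List.map_congr_left
  intro p _
  exact pvVal_append_of_ne L x (t, p) (fun he => h (congrArg Prod.fst he))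

theorem pvVecL_zero (L : List ((String × Int) × Int)) (m : Int) (hm : 0 ≤ m) (t : String)
    (h : t ∉ L.map (·.1.1)) : pvVecL L m t = List.replicate m.toNat 0 := by
  obtain ⟨n, rfl⟩ : ∃ n : Nat, m = (n : Int) := ⟨m.toNat, (Int.toNat_of_nonneg hm).symm⟩
  unfold pvVecL
  rw [PySem.List.pyRange_zero_natCast, List.map_map, List.eq_replicate_iff]
  refine ⟨by simp, ?_⟩
  intro v hv
  rw [List.mem_map] at hv
  obtain ⟨p, _, rfl⟩ := hv
  have : ∀ q : Int, pvVal L (t, q) = 0 := by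
    intro q
    unfold pvVal
    have : List.find? (fun kc => kc.1 == (t, q)) L = none := by
      rw [List.find?_eq_none]
      intro kc hkc
      simp only [beq_iff_eq]
      intro he
      exact h (List.mem_map.mpr ⟨kc, hkc, by rw [he]⟩)
    rw [this]
  simp [this]

theorem pvVecL_set (L : List ((String × Int) × Int)) (x : (String × Int) × Int) (m : Int)
    (hfresh : x.1 ∉ L.map (·.1)) (hp0 : 0 ≤ x.1.2) (hpm : x.1.2 < m) :
    PySem.List.pySetD (pvVecL L m x.1.1) x.1.2 x.2 = pvVecL (L ++ [x]) m x.1.1 := by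
  have hm : 0 ≤ m := le_of_lt (lt_of_le_of_lt hp0 hpm)
  obtain ⟨n, rfl⟩ : ∃ n : Nat, m = (n : Int) := ⟨m.toNat, (Int.toNat_of_nonneg hm).symm⟩
  obtain ⟨⟨t, pI⟩, c⟩ := x
  simp only at hp0 hpm hfresh ⊢
  obtain ⟨k, rfl⟩ : ∃ k : Nat, pI = (k : Int) := ⟨pI.toNat, (Int.toNat_of_nonneg hp0).symm⟩
  have hkn : k < n := by exact_mod_cast hpm
  have hvec : ∀ (L' : List ((String × Int) × Int)),
      pvVecL L' (n : Nat) t = (List.range n).map (fun j : Nat => pvVal L' (t, ((j : Nat) : Int))) := by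
    intro L'
    rw [pvVecL, PySem.List.pyRange_zero_natCast]
    simp
  have hlen : (pvVecL L (n : Nat) t).length = n := by
    rw [hvec, List.length_map, List.length_range]
  have hset : PySem.List.pySetD (pvVecL L (n : Nat) t) (k : Nat) c
      = (pvVecL L (n : Nat) t).set k c := by
    simp only [PySem.List.pySetD, PySem.List.pySet?, PySem.List.pyIdx?, hlen]
    split
    · simp
    · omega
  rw [hset]
  apply List.ext_getElem
  · rw [List.length_set, hvec, hvec, List.length_map, List.length_map]
  · intro i h1 h2
    rw [List.getElem_set]
    have hi : i < n := by rw [List.length_set, hlen] at h1; exact h1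
    simp only [hvec, List.getElem_map, List.getElem_range]
    by_cases hik : k = i
    · subst hik
      rw [if_pos rfl, pvVal_append_self L ((t, (k : Int)), c) hfresh]
    · rw [if_neg hik]
      rw [pvVal_append_of_ne L ((t, (k : Int)), c) (t, (i : Int))]
      intro he
      have h2 : ((i : Nat) : Int) = ((k : Nat) : Int) := congrArg Prod.snd he
      exact hik (by exact_mod_cast h2.symm)

theorem pvDedupMap (s : List (String × Int)) :
    PySem.List.dedup ((PySem.Set.ofList s).map Prod.fst) = PySem.List.dedup (s.map Prod.fst) := by
  induction s using List.reverseRecOn with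
  | nil => rfl
  | append_singleton s x ih =>
    rw [PySem.Set.ofList_append_singleton, PySem.Set.add_eq_ite]
    by_cases hx : x ∈ PySem.Set.ofList s
    · rw [if_pos hx, ih, List.map_append]
      simp only [List.map_cons, List.map_nil]
      rw [PySem.List.dedup_eq_ofList (List.map Prod.fst s ++ [x.1]),
          PySem.Set.ofList_append_singleton, PySem.Set.add_eq_ite, ← PySem.List.dedup_eq_ofList]
      rw [if_pos]
      rw [PySem.List.mem_dedup]
      exact List.mem_map_of_mem ((PySem.Set.mem_ofList s x).mp hx)
    · rw [if_neg hx, List.map_append]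
      simp only [List.map_cons, List.map_nil]
      rw [PySem.List.dedup_eq_ofList ((PySem.Set.ofList s).map Prod.fst ++ [x.1]),
          PySem.Set.ofList_append_singleton, PySem.Set.add_eq_ite, ← PySem.List.dedup_eq_ofList, ih]
      rw [List.map_append]
      simp only [List.map_cons, List.map_nil]
      rw [PySem.List.dedup_eq_ofList (List.map Prod.fst s ++ [x.1]),
          PySem.Set.ofList_append_singleton, PySem.Set.add_eq_ite, ← PySem.List.dedup_eq_ofList]

theorem pvFindMap (ks : List (String × Int)) (g : (String × Int) → Int) (a : String × Int)
    (ha : a ∈ ks) :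
    List.find? (fun kc => kc.1 == a) (ks.map (fun k => (k, g k))) = some (a, g a) := by
  induction ks with
  | nil => cases ha
  | cons k ks ih =>
    simp only [List.map_cons, List.find?_cons]
    by_cases hk : k = a
    · subst hk
      simp
    · have hb : (k == a) = false := beq_eq_false_iff_ne.mpr hk
      simp only [hb]
      exact ih ((List.mem_cons.mp ha).resolve_left (fun h => hk h.symm))

theorem pvVal_items (s : List (String × Int)) (a : String × Int) :
    pvVal (pvItems s) a = ((s.count a : Nat) : Int) := by
  unfold pvVal pvItems
  by_cases hm : a ∈ PySem.Set.ofList s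
  · rw [pvFindMap _ _ a hm]
  · have : List.find? (fun kc => kc.1 == a) ((PySem.Set.ofList s).map (fun k => (k, (s.count k : Int)))) = none := by
      rw [List.find?_eq_none]
      intro kc hkc
      rw [List.mem_map] at hkc
      obtain ⟨k, hk, rfl⟩ := hkc
      simp only [beq_iff_eq]
      intro he; exact hm (he ▸ hk)
    rw [this]
    have : a ∉ s := fun h => hm ((PySem.Set.mem_ofList s a).mpr h)
    simp [List.count_eq_zero.mpr this]

theorem pvFoldB2 (m : Int) (hm : 0 ≤ m) (L : List ((String × Int) × Int))
    (hnd : (L.map (·.1)).Nodup) (h : ∀ kc ∈ L, 0 ≤ kc.1.2 ∧ kc.1.2 < m) :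
    (L.foldl (pvStep2 m) PySem.Dict.empty).items
      = (PySem.List.dedup (L.map (·.1.1))).map (fun t => (t, pvVecL L m t)) := by
  induction L using List.reverseRecOn with
  | nil => rfl
  | append_singleton L x ih =>
    have hndL : (L.map (·.1)).Nodup := by
      rw [List.map_append] at hnd
      exact (List.nodup_append.mp hnd).1
    have hfresh : x.1 ∉ L.map (·.1) := by
      rw [List.map_append, List.nodup_append] at hnd
      simp only [List.map_cons, List.map_nil] at hnd
      intro hmem
      exact hnd.2.2 _ hmem _ (List.mem_singleton_self _) rfl
    have hL : ∀ kc ∈ L, 0 ≤ kc.1.2 ∧ kc.1.2 < m := fun kc hkc => h kc (List.mem_append_left _ hkc)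
    have hx := h x (List.mem_append_right _ (List.mem_singleton_self x))
    have ih' := ih hndL hL
    rw [List.foldl_append, List.foldl_cons, List.foldl_nil]
    set d := L.foldl (pvStep2 m) PySem.Dict.empty with hd
    have hkeys : d.keys = PySem.List.dedup (L.map (·.1.1)) := by
      rw [PySem.Dict.keys, ih', List.map_map]
      simp [Function.comp_def]
    have hnd' : d.keys.Nodup := by rw [hkeys]; exact PySem.List.nodup_dedup _
    have hc : d.contains x.1.1 = decide (x.1.1 ∈ L.map (·.1.1)) := by
      rw [PySem.Dict.contains_eq_decide_mem_keys, hkeys]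
      simp
    have hded : PySem.List.dedup ((L ++ [x]).map (·.1.1))
        = if x.1.1 ∈ L.map (·.1.1) then PySem.List.dedup (L.map (·.1.1))
          else PySem.List.dedup (L.map (·.1.1)) ++ [x.1.1] := by
      rw [List.map_append]
      simp only [List.map_cons, List.map_nil]
      rw [PySem.List.dedup_eq_ofList (List.map (·.1.1) L ++ [x.1.1]),
          PySem.Set.ofList_append_singleton, PySem.Set.add_eq_ite, ← PySem.List.dedup_eq_ofList]
      by_cases hq : x.1.1 ∈ List.map (·.1.1) L
      · rw [if_pos (by simpa [PySem.List.mem_dedup] using hq), if_pos hq]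
      · rw [if_neg (by simpa [PySem.List.mem_dedup] using hq), if_neg hq]
    by_cases hmem : x.1.1 ∈ L.map (·.1.1)
    · have hget : d.getD x.1.1 [] = pvVecL L m x.1.1 := by
        apply PySem.Dict.getD_of_mem_items d _ hnd'
        rw [ih']
        exact List.mem_map.mpr ⟨x.1.1, by simpa [PySem.List.mem_dedup] using hmem, rfl⟩
      rw [show pvStep2 m d x = d.insert x.1.1
            (PySem.List.pySetD (d.getD x.1.1 []) x.1.2 x.2) by
        simp [pvStep2, hc, hmem, PySem.Dict.modify]]
      rw [PySem.Dict.items_insert_of_contains _ _ (by rw [hc]; simpa using hmem)]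
      rw [hget, pvVecL_set L x m hfresh hx.1 hx.2, ih', hded, if_pos hmem, List.map_map]
      apply List.map_congr_left
      intro t ht
      by_cases htx : t = x.1.1
      · subst htx
        simp
      · have := pvVecL_ne L x m t htx
        simp [htx, this]
    · have hc' : d.contains x.1.1 = false := by rw [hc]; simpa using hmem
      rw [show pvStep2 m d x = d.insert x.1.1
            (PySem.List.pySetD (List.replicate m.toNat (0:Int)) x.1.2 x.2) by
        simp [pvStep2, hc', PySem.Dict.modify, PySem.Dict.getD_insert_self,
          PySem.Dict.insert_insert_self]]
      rw [PySem.Dict.items_insert_of_not_contains _ _ hc']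
      rw [← pvVecL_zero L m hm x.1.1 hmem, pvVecL_set L x m hfresh hx.1 hx.2, ih', hded,
          if_neg hmem, List.map_append]
      simp only [List.map_cons, List.map_nil]
      congr 1
      apply List.map_congr_left
      intro t ht
      have htx : t ≠ x.1.1 := by
        intro he; subst he
        exact hmem (by simpa [PySem.List.mem_dedup] using ht)
      rw [pvVecL_ne L x m t htx]

-- B's counting loops build the counter of the flat occurrence stream
theorem pvNestedCnt (data : List (List String)) :
    data.foldl (fun cnt r =>
        (PySem.List.enumerate r).foldl (fun cnt pt =>
          let key := (pt.2, pt.1)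
          cnt.insert key (cnt.getD key 0 + 1)) cnt) PySem.Dict.empty
      = PySem.Dict.counter (pvFlat data) := by
  rw [← PySem.Dict.foldl_insert_getD_add_one_eq_counter, pvFlat, List.foldl_flatMap]
  congr 1
  funext cnt r
  rw [List.foldl_map]

theorem pvFoldA (m : Int) (hm : 0 ≤ m) (s : List (String × Int))
    (h : ∀ tp ∈ s, 0 ≤ tp.2 ∧ tp.2 < m) :
    (s.foldl (pvStep m) PySem.Dict.empty).items
      = (PySem.List.dedup (s.map Prod.fst)).map (fun t => (t, pvVec m s t)) := by
  induction s using List.reverseRecOn with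
  | nil => rfl
  | append_singleton s x ih =>
    have hs : ∀ tp ∈ s, 0 ≤ tp.2 ∧ tp.2 < m := fun tp htp => h tp (List.mem_append_left _ htp)
    have hx := h x (List.mem_append_right _ (List.mem_singleton_self x))
    have ih' := ih hs
    rw [List.foldl_append, List.foldl_cons, List.foldl_nil]
    set d := s.foldl (pvStep m) PySem.Dict.empty with hd
    have hkeys : d.keys = PySem.List.dedup (s.map Prod.fst) := by
      rw [PySem.Dict.keys, ih', List.map_map]
      simp [Function.comp_def]
    have hnd : d.keys.Nodup := by rw [hkeys]; exact PySem.List.nodup_dedup _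
    have hc : d.contains x.1 = decide (x.1 ∈ s.map Prod.fst) := by
      rw [PySem.Dict.contains_eq_decide_mem_keys, hkeys]
      simp
    -- new RHS dedup
    have hded : PySem.List.dedup ((s ++ [x]).map Prod.fst)
        = if x.1 ∈ s.map Prod.fst then PySem.List.dedup (s.map Prod.fst)
          else PySem.List.dedup (s.map Prod.fst) ++ [x.1] := by
      rw [List.map_append]
      simp only [List.map_cons, List.map_nil]
      rw [PySem.List.dedup_eq_ofList (List.map Prod.fst s ++ [x.1]),
          PySem.Set.ofList_append_singleton, PySem.Set.add_eq_ite, ← PySem.List.dedup_eq_ofList]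
      by_cases hq : x.1 ∈ List.map Prod.fst s
      · rw [if_pos (by simpa [PySem.List.mem_dedup] using hq), if_pos hq]
      · rw [if_neg (by simpa [PySem.List.mem_dedup] using hq), if_neg hq]
    by_cases hmem : x.1 ∈ s.map Prod.fst
    · -- existing key: pvStep keeps d, modifies entry
      have hget : d.getD x.1 [] = pvVec m s x.1 := by
        apply PySem.Dict.getD_of_mem_items d _ hnd
        rw [ih']
        exact List.mem_map.mpr ⟨x.1, by simpa [PySem.List.mem_dedup] using hmem, rfl⟩
      rw [show pvStep m d x = d.insert x.1
            (PySem.List.pySetD (d.getD x.1 []) x.2 (PySem.List.pyGetD (d.getD x.1 []) x.2 0 + 1)) by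
        simp [pvStep, hc, hmem, PySem.Dict.modify]]
      rw [PySem.Dict.items_insert_of_contains _ _ (by rw [hc]; simpa using hmem)]
      rw [hget, pvVec_set m s x.1 x.2 hx.1 hx.2, ih', hded, if_pos hmem, List.map_map]
      apply List.map_congr_left
      intro t ht
      by_cases htx : t = x.1
      · subst htx
        simp
      · have : pvVec m (s ++ [x]) t = pvVec m s t := pvVec_ne m s x t htx
        simp [htx, this]
    · -- new key
      have hc' : d.contains x.1 = false := by rw [hc]; simpa using hmem
      rw [show pvStep m d x = d.insert x.1
            (PySem.List.pySetD (List.replicate m.toNat (0:Int)) x.2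
              (PySem.List.pyGetD (List.replicate m.toNat (0:Int)) x.2 0 + 1)) by
        simp [pvStep, hc', PySem.Dict.modify, PySem.Dict.getD_insert_self,
          PySem.Dict.insert_insert_self]]
      rw [PySem.Dict.items_insert_of_not_contains _ _ hc']
      rw [← pvVec_zero m hm s x.1 hmem, pvVec_set m s x.1 x.2 hx.1 hx.2, ih', hded, if_neg hmem,
          List.map_append]
      simp only [List.map_cons, List.map_nil]
      congr 1
      apply List.map_congr_left
      intro t ht
      have htx : t ≠ x.1 := by
        intro he; subst he
        exact hmem (by simpa [PySem.List.mem_dedup] using ht)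
      rw [pvVec_ne m s x t htx]

theorem terms_position_freq_spec : Claim_equal_terms_position_freq := by
  intro data _ hpre
  unfold Spec_terms_position_freq terms_position_freq terms_position_freq_alt
  cases hmax : PySem.List.max? (data.map PySem.List.len) id with
  | none => rfl
  | some m =>
    have hm0 : 0 ≤ m := by
      have hmem := PySem.List.max?_mem hmax
      obtain ⟨r, _, hr⟩ := List.mem_map.mp hmem
      rw [PySem.List.len_eq] at hr
      omega
    have hrange : ∀ tp ∈ pvFlat data, 0 ≤ tp.2 ∧ tp.2 < m := by
      intro tp htp
      rw [pvFlat, List.mem_flatMap] at htp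
      obtain ⟨r, hrd, htp⟩ := htp
      rw [List.mem_map] at htp
      obtain ⟨pt, hpt, rfl⟩ := htp
      rw [PySem.List.mem_enumerate_iff] at hpt
      obtain ⟨k, hk, rfl⟩ := hpt
      have hle : PySem.List.len r ≤ id m :=
        PySem.List.max?_isMax hmax _ (List.mem_map_of_mem hrd)
      rw [PySem.List.len_eq] at hle
      simp only [id] at hle
      constructor
      · simp
      · simp only []
        omega
    simp only []
    rw [pvNested data m, pvFoldA m hm0 (pvFlat data) hrange, pvNestedCnt data,
        PySem.Dict.items_counter, ← pvItems]
    have hnd2 : ((pvItems (pvFlat data)).map (·.1)).Nodup := by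
      rw [pvItems, List.map_map]
      simp only [Function.comp_def]
      simp [PySem.Set.nodup_ofList (pvFlat data)]
    have hrange2 : ∀ kc ∈ pvItems (pvFlat data), 0 ≤ kc.1.2 ∧ kc.1.2 < m := by
      intro kc hkc
      rw [pvItems, List.mem_map] at hkc
      obtain ⟨k, hk, rfl⟩ := hkc
      exact hrange k ((PySem.Set.mem_ofList _ k).mp hk)
    rw [show (fun (terms : PySem.Dict String (List Int)) (kc : (String × Int) × Int) =>
          (if terms.contains kc.1.1 then terms
           else terms.insert kc.1.1 (List.replicate m.toNat (0 : Int))).modify kc.1.1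
            [] fun l => PySem.List.pySetD l kc.1.2 kc.2) = pvStep2 m from rfl]
    rw [pvFoldB2 m hm0 (pvItems (pvFlat data)) hnd2 hrange2]
    have hded2 : PySem.List.dedup ((pvItems (pvFlat data)).map (·.1.1))
        = PySem.List.dedup ((pvFlat data).map Prod.fst) := by
      rw [pvItems, List.map_map]
      simp only [Function.comp_def]
      exact pvDedupMap (pvFlat data)
    rw [hded2]
    apply List.map_congr_left
    intro t _
    refine congrArg _ ?_
    rw [pvVec, pvVecL]
    apply List.map_congr_left
    intro p _
    rw [pvVal_items]
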